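-- pv_equiv track=rewrite | github.com/fabien-208/cours | cours/L2/Semestre 4/algo 4/TP/TP 1/TP 1.py | no2slash
-- ===== SOURCE A (Python) =====
-- def no2slash(name):
--     l = list(name)
--     x = 1
--     while x < len(l):
--         if (l[x-1] == '/') and (l[x] == '/'):
--             for y in range(x+1, len(l)):
--                 l[y-1] = l[y]
--             l = l[:-1]
--         else:
--             x += 1
--     return ''.join(l)
-- ===== SOURCE B (Python) =====
-- from itertools import groupby
--
-- def no2slash(name):
--     out = []
--     for ch, grp in groupby(name):
--         if ch == '/':
--             out.append('/')
--         else: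
--             out.extend(grp)
--     return ''.join(out)
-- ===== Notes on version B (the rewrite author's own statement) =====
-- stated objective: idiomatic
-- what changed: Replaces A's while-loop with an in-place element-shifting deletion per duplicate slash by a single itertools.groupby pass over maximal runs of identical characters, emitting one slash per slash run.
import Mathlib
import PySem

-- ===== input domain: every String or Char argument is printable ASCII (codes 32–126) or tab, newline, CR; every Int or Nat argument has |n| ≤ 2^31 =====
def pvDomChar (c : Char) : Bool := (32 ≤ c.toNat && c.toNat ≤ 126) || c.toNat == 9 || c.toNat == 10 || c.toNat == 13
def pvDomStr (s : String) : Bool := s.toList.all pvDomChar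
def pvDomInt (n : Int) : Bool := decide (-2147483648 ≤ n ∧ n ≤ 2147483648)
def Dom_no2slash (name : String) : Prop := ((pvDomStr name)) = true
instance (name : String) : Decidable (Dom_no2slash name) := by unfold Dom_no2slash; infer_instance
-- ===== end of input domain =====

-- B replaces A's in-place element-shifting deletion loop by a single groupby-style
-- pass over maximal runs of identical characters, emitting one slash per slash run
-- (idiomatic); equality of the returned string is proved for all inputs.


-- ===== PORT A =====
-- the inner 'for y in range(x+1, len(l)): l[y-1] = l[y]' loop, step for step
def pvShift (l : List Char) (y : Nat) : List Char :=
  if y < l.length then pvShift (l.set (y - 1) l[y]!) (y + 1) else l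
termination_by l.length - y
decreasing_by simp_all; omega

-- length is preserved by the shifting loop (needed for termination of pvLoopA)
theorem pvShift_length (l : List Char) (y : Nat) : (pvShift l y).length = l.length := by
  unfold pvShift
  split
  · rw [pvShift_length]; simp
  · rfl
termination_by l.length - y
decreasing_by simp_all; omega

-- the outer 'while x < len(l)' loop of A
def pvLoopA (l : List Char) (x : Nat) : List Char :=
  if x < l.length then
    if l[x-1]! = '/' ∧ l[x]! = '/' then
      pvLoopA (pvShift l (x + 1)).dropLast x
    else
      pvLoopA l (x + 1)
  else l
termination_by l.length - x
decreasing_by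
  · have := pvShift_length l (x + 1); simp_all; omega
  · simp_all; omega

def no2slash (name : String) : String := String.ofList (pvLoopA name.toList 1)

-- ===== PORT B =====
-- itertools.groupby: the maximal runs of identical characters, in order
def pvRuns : List Char → List (Char × List Char)
  | [] => []
  | c :: rest =>
      (c, c :: rest.takeWhile (· = c)) :: pvRuns (rest.dropWhile (· = c))
termination_by l => l.length
decreasing_by
  have := List.length_dropWhile_le (fun x => x = c) rest
  simp; omega

def no2slash_alt (name : String) : String :=
  String.ofList ((pvRuns name.toList).flatMap fun g => if g.1 = '/' then ['/'] else g.2)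

-- ===== PRECONDITION & SPEC =====
def Spec_no2slash (name : String) (out : String) : Prop := out = no2slash_alt name
instance (name : String) (out : String) : Decidable (Spec_no2slash name out) := by unfold Spec_no2slash; infer_instance

-- ===== CLAIM (what is proved, stated in full; the proofs are below) =====
def Claim_equal_no2slash : Prop := ∀ (name : String), Dom_no2slash name → Spec_no2slash name (no2slash name)

-- ===== LEMMAS AND PROOFS =====

-- reference collapse: keep a character unless it and the previous kept one are both '/'
def pvC : List Char → List Char
  | [] => []
  | a :: rest => a :: pvCfrom a rest
where pvCfrom : Char → List Char → List Char
  | _, [] => []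
  | p, b :: rest => if p = '/' ∧ b = '/' then pvC.pvCfrom p rest else b :: pvC.pvCfrom b rest

theorem pvShift_spec (l : List Char) (y : Nat) :
    1 ≤ y → y ≤ l.length → pvShift l y = l.take (y - 1) ++ l.drop y ++ [l[l.length - 1]!] := by
  induction l, y using pvShift.induct with
  | case1 l y h ih =>
    intro h1 _
    rw [pvShift, if_pos h]
    rw [ih (by omega) (by simp; omega)]
    have hset : (l.set (y - 1) l[y]!).length = l.length := by simp
    have h1' : (l.set (y - 1) l[y]!).take y = l.take (y - 1) ++ [l[y]!] := by
      rw [List.take_set, List.set_eq_take_append_cons_drop, if_pos (by simp; omega)]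
      simp [List.take_take, List.drop_take]
      omega
    have h2' : (l.set (y - 1) l[y]!).drop (y + 1) = l.drop (y + 1) := by
      rw [List.drop_set, if_pos (by omega)]
    have h3' : (l.set (y - 1) l[y]!)[(l.set (y - 1) l[y]!).length - 1]! = l[l.length - 1]! := by
      have e1 : (l.set (y - 1) l[y]!)[(l.set (y - 1) l[y]!).length - 1]! =
          (l.set (y - 1) l[y]!)[l.length - 1]! := by rw [hset]
      rw [e1, getElem!_pos (l.set (y - 1) l[y]!) (l.length - 1) (by simp; omega),
        getElem!_pos l (l.length - 1) (by omega)]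
      exact List.getElem_set_ne (by omega) _
    simp only [Nat.add_sub_cancel]
    rw [h1', h2', h3', List.drop_eq_getElem_cons h, getElem!_pos l y h]
    simp
  | case2 l y h =>
    intro h1 h2
    have hy : y = l.length := by omega
    have hne : l ≠ [] := by intro e; subst e; simp at hy; omega
    rw [pvShift, if_neg h]
    subst hy
    rw [List.drop_length, getElem!_pos _ _ (by omega), ← List.getLast_eq_getElem hne,
      ← List.dropLast_eq_take]
    simp [List.dropLast_append_getLast hne]

-- the shift loop followed by 'l = l[:-1]' deletes the element at index x
theorem pvShift_dropLast (l : List Char) (x : Nat) (h1 : 1 ≤ x) (h2 : x < l.length) :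
    (pvShift l (x + 1)).dropLast = l.take x ++ l.drop (x + 1) := by
  rw [pvShift_spec l (x + 1) (by omega) (by omega)]
  simp

theorem pvLoopA_spec (l : List Char) (x : Nat) :
    1 ≤ x → x ≤ l.length → pvLoopA l x = l.take x ++ pvC.pvCfrom (l[x-1]!) (l.drop x) := by
  induction l, x using pvLoopA.induct with
  | case1 l x h hc ih =>
    intro h1 h2
    rw [pvLoopA, if_pos h, if_pos hc]
    have hd := pvShift_dropLast l x h1 h
    rw [hd] at ih
    have htl : (l.take x).length = x := by simp; omega
    rw [hd, ih (by omega) (by simp; omega)]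
    rw [List.take_left' htl, List.drop_left' htl]
    have hg : (l.take x ++ l.drop (x + 1))[x-1]! = l[x-1]! := by
      rw [getElem!_pos _ _ (by simp; omega), getElem!_pos l (x-1) (by omega),
        List.getElem_append_left (by omega), List.getElem_take]
    rw [hg]
    have hR : pvC.pvCfrom l[x-1]! (l.drop x) = pvC.pvCfrom l[x-1]! (l.drop (x+1)) := by
      rw [List.drop_eq_getElem_cons h,
        show l[x] = l[x]! from (getElem!_pos l x h).symm]
      simp only [pvC.pvCfrom, if_pos hc]
    rw [hR]
  | case2 l x h hc ih =>
    intro h1 h2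
    rw [pvLoopA, if_pos h, if_neg hc]
    rw [ih (by omega) (by omega)]
    simp only [Nat.add_sub_cancel]
    have hR : pvC.pvCfrom l[x-1]! (l.drop x) = l[x]! :: pvC.pvCfrom l[x]! (l.drop (x+1)) := by
      rw [List.drop_eq_getElem_cons h,
        show l[x] = l[x]! from (getElem!_pos l x h).symm]
      simp only [pvC.pvCfrom, if_neg hc]
    rw [hR, List.take_add_one, List.getElem?_eq_getElem h,
      show l[x] = l[x]! from (getElem!_pos l x h).symm]
    simp
  | case3 l x h =>
    intro h1 h2
    have hx : x = l.length := by omega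
    rw [pvLoopA, if_neg h]
    subst hx
    simp [pvC.pvCfrom]

-- collapsing a run of copies of c after a kept c keeps it all iff c is not '/'
theorem pvC_cons (a : Char) (l : List Char) : pvC (a :: l) = a :: pvC.pvCfrom a l := rfl

theorem pvCfrom_run (c : Char) (t r : List Char) (ht : ∀ x ∈ t, x = c) :
    pvC.pvCfrom c (t ++ r) = (if c = '/' then [] else t) ++ pvC.pvCfrom c r := by
  induction t with
  | nil => simp
  | cons a t' ih =>
    have ha : a = c := ht a (by simp)
    subst ha
    simp only [List.cons_append, pvC.pvCfrom]
    by_cases hc : a = '/'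
    · rw [if_pos ⟨hc, hc⟩, if_pos hc, ih (fun x hx => ht x (by simp [hx]))]
      simp [hc]
    · rw [if_neg (fun hp => hc hp.1), if_neg hc, ih (fun x hx => ht x (by simp [hx]))]
      simp [hc]

-- after the run, the next character differs from c, so collapsing restarts cleanly
theorem pvCfrom_switch (c : Char) (r : List Char) (hr : ∀ d t, r = d :: t → d ≠ c) :
    pvC.pvCfrom c r = pvC r := by
  cases r with
  | nil => simp [pvC, pvC.pvCfrom]
  | cons d t =>
    have hd : d ≠ c := hr d t rfl
    simp only [pvC.pvCfrom, pvC]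
    rw [if_neg (fun hp => hd (hp.2.trans hp.1.symm))]

theorem pvRuns_spec (l : List Char) :
    (pvRuns l).flatMap (fun g => if g.1 = '/' then ['/'] else g.2) = pvC l := by
  induction l using pvRuns.induct with
  | case1 => simp [pvRuns, pvC]
  | case2 c rest ih =>
    rw [pvRuns]
    simp only [List.flatMap_cons, ih]
    conv_rhs => rw [show rest = rest.takeWhile (· = c) ++ rest.dropWhile (· = c) from
      (List.takeWhile_append_dropWhile).symm]
    rw [pvC_cons]
    rw [pvCfrom_run c _ _ (fun x hx => of_decide_eq_true (List.mem_takeWhile_imp (p := (· = c)) hx)),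
      pvCfrom_switch c _ (fun d t hdt => by
        have hne : rest.dropWhile (· = c) ≠ [] := by simp [hdt]
        have := List.head_dropWhile_not (· = c) hne
        simp only [hdt, List.head_cons] at this
        simpa using this)]
    by_cases hc : c = '/' <;> simp [hc]

theorem pvLoopA_eq_pvC (l : List Char) : pvLoopA l 1 = pvC l := by
  cases l with
  | nil => rw [pvLoopA]; simp [pvC]
  | cons a rest =>
    rw [pvLoopA_spec _ 1 (by omega) (by simp)]
    simp [pvC]

theorem no2slash_spec : Claim_equal_no2slash := by
  intro name _
  show _ = _
  unfold no2slash no2slash_alt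
  rw [pvRuns_spec, pvLoopA_eq_pvC]
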